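-- pv_equiv track=rewrite | github.com/LamotheMax/MSR_2018_Android_API_Study | CommonChangeTracker.py | separate_diff_into_subsections
-- ===== SOURCE A (Python) =====
-- def separate_diff_into_subsections(diff):
--     sections = []
--     current_section = []
--     for line in diff:
--
--         # this takes care of only having a single diff section to observe at a time
--         if "@@" in line:
--             if len(current_section) > 0:
--                 sections.append(current_section)
--                 current_section = []
--         current_section.append(line)
--
--     if len(current_section) > 0:
--         sections.append(current_section)
--
--     return sections
-- ===== SOURCE B (Python) =====
-- def separate_diff_into_subsections(diff):
--     # Staged index-based approach: one pass to find marker positions, then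
--     # build section boundaries and cut the diff into slices between them.
--     if not diff:
--         return []
--     markers = [i for i, line in enumerate(diff) if "@@" in line]
--     starts = [0] + [i for i in markers if i > 0]
--     bounds = starts + [len(diff)]
--     return [diff[a:b] for a, b in zip(bounds, bounds[1:])]
-- ===== Notes on version B (the rewrite author's own statement) =====
-- stated objective: alternative
-- what changed: Replaces A's single-pass flush-before-marker accumulator loop by staged passes: collect the indices of '@@' marker lines, turn them into section start boundaries (deduplicating a marker at index 0), and cut the diff into slices between consecutive boundaries.
import Mathlib
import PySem

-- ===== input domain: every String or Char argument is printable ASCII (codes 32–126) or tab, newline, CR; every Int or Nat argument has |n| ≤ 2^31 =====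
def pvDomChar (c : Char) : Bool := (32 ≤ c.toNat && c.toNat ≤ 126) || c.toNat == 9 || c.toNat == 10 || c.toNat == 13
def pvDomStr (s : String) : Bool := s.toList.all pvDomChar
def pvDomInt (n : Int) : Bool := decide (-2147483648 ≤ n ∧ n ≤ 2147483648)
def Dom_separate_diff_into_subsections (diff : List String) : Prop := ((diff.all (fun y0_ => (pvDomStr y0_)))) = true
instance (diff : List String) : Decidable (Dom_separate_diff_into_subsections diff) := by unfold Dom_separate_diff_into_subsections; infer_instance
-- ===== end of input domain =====

-- B replaces A's flush-before-marker accumulator loop by staged passes: collect marker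
-- indices, build section boundaries, then slice the diff between consecutive boundaries
-- (an alternative decomposition; same asymptotic cost).


-- ===== PORT A =====
def separate_diff_into_subsections (diff : List String) : List (List String) :=
  let st := diff.foldl
    (fun (st : List (List String) × List String) line =>
      -- if "@@" in line and len(current_section) > 0: flush current_section
      let st := if PySem.Str.isIn "@@" line && decide (st.2.length > 0)
                then (st.1 ++ [st.2], ([] : List String)) else st
      -- current_section.append(line)
      (st.1, st.2 ++ [line]))
    ([], [])
  if st.2.length > 0 then st.1 ++ [st.2] else st.1

-- ===== PORT B =====
def separate_diff_into_subsections_alt (diff : List String) : List (List String) :=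
  if diff = [] then []
  else
    -- markers = [i for i, line in enumerate(diff) if "@@" in line]
    let markers := ((PySem.List.enumerate diff 0).filter
      (fun p => PySem.Str.isIn "@@" p.2)).map Prod.fst
    -- starts = [0] + [i for i in markers if i > 0]
    let starts := (0 : Int) :: markers.filter (fun i => decide (0 < i))
    -- bounds = starts + [len(diff)]
    let bounds := starts ++ [(diff.length : Int)]
    -- [diff[a:b] for a, b in zip(bounds, bounds[1:])]
    (bounds.zip bounds.tail).map (fun p => PySem.List.slice diff (some p.1) (some p.2))

-- ===== PRECONDITION & SPEC =====
def Spec_separate_diff_into_subsections (diff : List String) (out : List (List String)) : Prop := out = separate_diff_into_subsections_alt diff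
instance (diff : List String) (out : List (List String)) : Decidable (Spec_separate_diff_into_subsections diff out) := by unfold Spec_separate_diff_into_subsections; infer_instance

-- ===== CLAIM (what is proved, stated in full; the proofs are below) =====
def Claim_equal_separate_diff_into_subsections : Prop := ∀ (diff : List String), Dom_separate_diff_into_subsections diff → Spec_separate_diff_into_subsections diff (separate_diff_into_subsections diff)

-- ===== LEMMAS AND PROOFS =====

-- Reference form: sections as "leading line plus following non-marker lines".
def pvChunks : List String → List (List String)
  | [] => []
  | x :: xs =>
      (x :: xs.takeWhile (fun l => !PySem.Str.isIn "@@" l)) ::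
        pvChunks (xs.dropWhile (fun l => !PySem.Str.isIn "@@" l))
termination_by l => l.length
decreasing_by
  simp only [List.length_cons]
  exact Nat.lt_succ_of_le (xs.length_dropWhile_le _)

-- A's step function, named for the lemmas.
def pvStepA (st : List (List String) × List String) (line : String) :
    List (List String) × List String :=
  let st := if PySem.Str.isIn "@@" line && decide (st.2.length > 0)
            then (st.1 ++ [st.2], ([] : List String)) else st
  (st.1, st.2 ++ [line])

-- Marker indices of a list (as offsets from its head).
def pvMk : List String → List Nat
  | [] => []
  | y :: ys => (if PySem.Str.isIn "@@" y then [0] else []) ++ (pvMk ys).map (· + 1)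

-- Slices of `diff` between consecutive bounds `a :: bs`.
def pvSegs (diff : List String) : Nat → List Nat → List (List String)
  | _, [] => []
  | a, b :: bs =>
      PySem.List.slice diff (some (a : Int)) (some (b : Int)) :: pvSegs diff b bs

theorem pvFoldlA_chunks (xs : List String) :
    ∀ (secs : List (List String)) (cur : List String), cur ≠ [] →
      (let st := xs.foldl pvStepA (secs, cur)
       if st.2.length > 0 then st.1 ++ [st.2] else st.1) =
        secs ++ ((cur ++ xs.takeWhile (fun l => !PySem.Str.isIn "@@" l)) ::
          pvChunks (xs.dropWhile (fun l => !PySem.Str.isIn "@@" l))) := by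
  induction xs with
  | nil =>
      intro secs cur hcur
      have hlen : 0 < cur.length := List.length_pos_iff.mpr hcur
      simp [pvChunks, hlen]
  | cons x xs ih =>
      intro secs cur hcur
      simp only [List.foldl_cons]
      by_cases hm : PySem.Chars.isIn ['@', '@'] x.toList = true
      · have hlen : 0 < cur.length := List.length_pos_iff.mpr hcur
        have hstep : pvStepA (secs, cur) x = (secs ++ [cur], [x]) := by
          simp [pvStepA, hm, hlen]
        rw [hstep, ih (secs ++ [cur]) [x] (by simp)]
        simp [pvChunks, hm]
      · have hstep : pvStepA (secs, cur) x = (secs, cur ++ [x]) := by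
          simp [pvStepA, hm]
        rw [hstep, ih secs (cur ++ [x]) (by simp)]
        simp [hm]

theorem pvA_eq_chunks (diff : List String) :
    separate_diff_into_subsections diff = pvChunks diff := by
  cases diff with
  | nil => simp [separate_diff_into_subsections, pvChunks]
  | cons x xs =>
      show (let st := (x :: xs).foldl pvStepA ([], [])
            if st.2.length > 0 then st.1 ++ [st.2] else st.1) = _
      simp only [List.foldl_cons]
      have hstep : pvStepA ([], []) x = ([], [x]) := by simp [pvStepA]
      rw [hstep, pvFoldlA_chunks xs [] [x] (by simp)]
      simp [pvChunks]

-- B's marker pass computes pvMk, shifted by the enumeration start.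
theorem pvMarkers_eq_mk (xs : List String) :
    ∀ (s : Int),
      ((PySem.List.enumerate xs s).filter (fun p => PySem.Str.isIn "@@" p.2)).map Prod.fst =
        (pvMk xs).map (fun i : Nat => s + (i : Int)) := by
  induction xs with
  | nil => intro s; simp [pvMk, PySem.List.enumerate_nil]
  | cons x xs ih =>
      intro s
      rw [PySem.List.enumerate_cons]
      by_cases hm : PySem.Chars.isIn ['@', '@'] x.toList = true
      · have h1 : pvMk (x :: xs) = 0 :: (pvMk xs).map (· + 1) := by simp [pvMk, hm]
        have h2 : (((s, x) :: PySem.List.enumerate xs (s + 1)).filter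
            (fun p => PySem.Str.isIn "@@" p.2)) =
            (s, x) :: (PySem.List.enumerate xs (s + 1)).filter
              (fun p => PySem.Str.isIn "@@" p.2) := by
          simp [List.filter_cons, hm]
        rw [h1, h2, List.map_cons, ih (s + 1), List.map_cons, List.map_map]
        congr 1
        · simp
        · apply List.map_congr_left
          intro i _
          simp only [Function.comp_apply]
          push_cast
          ring
      · have h1 : pvMk (x :: xs) = (pvMk xs).map (· + 1) := by simp [pvMk, hm]
        have h2 : (((s, x) :: PySem.List.enumerate xs (s + 1)).filter
            (fun p => PySem.Str.isIn "@@" p.2)) =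
            (PySem.List.enumerate xs (s + 1)).filter
              (fun p => PySem.Str.isIn "@@" p.2) := by
          simp [List.filter_cons, hm]
        rw [h1, h2, ih (s + 1), List.map_map]
        apply List.map_congr_left
        intro i _
        simp only [Function.comp_apply]
        push_cast
        ring

-- zip-with-tail over cast bounds is pvSegs.
theorem pvZip_eq_segs (diff : List String) :
    ∀ (l : List Nat) (a : Nat),
      ((((a :: l).map (fun i : Nat => (i : Int))).zip (l.map (fun i : Nat => (i : Int)))).map
          (fun p => PySem.List.slice diff (some p.1) (some p.2))) =
        pvSegs diff a l := by
  intro l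
  induction l with
  | nil => intro a; simp [pvSegs]
  | cons b bs ih => intro a; simp only [List.map_cons, List.zip_cons_cons, List.map_cons, pvSegs]
                    rw [← ih b]; simp

-- shifting all bounds by a common prefix length
theorem pvSegs_shift (p d : List String) :
    ∀ (bs : List Nat) (a : Nat),
      pvSegs (p ++ d) (p.length + a) (bs.map (fun i => p.length + i)) = pvSegs d a bs := by
  intro bs
  induction bs with
  | nil => intro a; simp [pvSegs]
  | cons b bs ih =>
      intro a
      simp only [List.map_cons, pvSegs, ih b]
      congr 1
      have h1 : PySem.List.slice (p ++ d) (some ((p.length + a : Nat) : Int))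
          (some ((p.length + b : Nat) : Int)) =
          ((p ++ d).drop (p.length + a)).take ((p.length + b) - (p.length + a)) := by
        exact_mod_cast PySem.List.slice_natCast (p ++ d) (p.length + a) (p.length + b)
      have h2 : PySem.List.slice d (some (a : Nat) : Option Int) (some ((b : Nat) : Int)) =
          (d.drop a).take (b - a) := PySem.List.slice_natCast d a b
      rw [show ((p.length + a : Nat) : Int) = ((p.length : Nat) : Int) + (a : Nat) by push_cast; ring] at h1
      rw [show ((p.length + b : Nat) : Int) = ((p.length : Nat) : Int) + (b : Nat) by push_cast; ring] at h1
      push_cast at h1 ⊢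
      rw [h1, h2, List.drop_length_add_append]
      simp [Nat.add_sub_add_left]

-- pvMk over a marker-free prefix is a shift.
theorem pvMk_nm_append (t d : List String)
    (ht : ∀ l ∈ t, PySem.Str.isIn "@@" l = false) :
    pvMk (t ++ d) = (pvMk d).map (fun i => t.length + i) := by
  induction t with
  | nil => simp
  | cons y ys ih =>
      have hy := ht y (by simp)
      simp only [List.cons_append, pvMk, hy, Bool.false_eq_true, if_neg, not_false_iff,
        List.nil_append, ih (fun l hl => ht l (by simp [hl])), List.map_map]
      apply List.map_congr_left
      intro i _
      simp [Function.comp]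
      omega

-- head of dropWhile is a marker; mk of such a list starts with 0
theorem pvMk_dropWhile_head (m : String) (d' : List String)
    (hm : PySem.Chars.isIn ['@', '@'] m.toList = true) :
    pvMk (m :: d') = 0 :: (pvMk d').map (· + 1) := by
  simp [pvMk, hm]

-- Main: chunks = segs over positive marker indices plus the final bound.
theorem pvChunks_eq_segs (n : Nat) :
    ∀ (diff : List String), diff.length ≤ n → diff ≠ [] →
      pvChunks diff =
        pvSegs diff 0 (((pvMk diff).filter (fun i => decide (0 < i))) ++ [diff.length]) := by
  induction n with
  | zero =>
      intro diff h hne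
      cases diff with
      | nil => exact absurd rfl hne
      | cons x xs => simp at h
  | succ n ih =>
      intro diff hlen hne
      cases diff with
      | nil => exact absurd rfl hne
      | cons x xs =>
        set nm := fun l => !PySem.Str.isIn "@@" l with hnm
        set t := xs.takeWhile nm with ht
        set d := xs.dropWhile nm with hd
        have hxs : xs = t ++ d := (xs.takeWhile_append_dropWhile (p := nm)).symm
        have htnm : ∀ l ∈ t, PySem.Str.isIn "@@" l = false := by
          intro l hl
          have := xs.mem_takeWhile_imp (p := nm) (ht ▸ hl)
          simpa [hnm] using this
        -- the positive-marker list of (x :: xs)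
        have hmk : ((pvMk (x :: xs)).filter (fun i => decide (0 < i))) =
            (pvMk d).map (fun i => (t.length + 1) + i) := by
          have h1 : pvMk (x :: xs) =
              (if PySem.Str.isIn "@@" x then [0] else []) ++ (pvMk xs).map (· + 1) := rfl
          rw [h1, List.filter_append]
          have h0 : ((if PySem.Str.isIn "@@" x then [0] else []).filter
              (fun i => decide (0 < i))) = ([] : List Nat) := by
            by_cases hx : PySem.Str.isIn "@@" x = true <;> simp [hx]
          have hpos : ((pvMk xs).map (· + 1)).filter (fun i => decide (0 < i)) =
              (pvMk xs).map (· + 1) := by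
            apply List.filter_eq_self.mpr
            intro a ha
            obtain ⟨b, _, rfl⟩ := List.mem_map.mp ha
            simp
          rw [h0, hpos, List.nil_append, hxs, pvMk_nm_append t d htnm, List.map_map]
          apply List.map_congr_left; intro i _; simp [Function.comp]; omega
        have hchunks : pvChunks (x :: xs) = (x :: t) :: pvChunks d := by
          rw [pvChunks]
        rw [hmk, hchunks]
        by_cases hdnil : d = []
        · have hxt : x :: xs = x :: t := by rw [hxs, hdnil]; simp
          simp only [hdnil, pvMk, List.map_nil, List.nil_append, pvSegs]
          rw [hxt]
          simp [pvChunks, pvSegs, PySem.List.slice_natCast]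
          rw [PySem.List.slice_to]
          · have h5 : ((t.length : Int) + 1).toNat = t.length + 1 := by omega
            rw [h5]
            simp [List.take_succ_cons]
          · positivity
        · obtain ⟨m, d', hdc⟩ := List.exists_cons_of_ne_nil hdnil
          have hne2 : List.dropWhile nm xs ≠ [] := by rw [← hd]; exact hdnil
          have h3 := List.head_dropWhile_not nm hne2
          have h4 : (List.dropWhile nm xs).head hne2 = m := by
            have h5 : (List.dropWhile nm xs).head? = some m := by rw [← hd, hdc]; rfl
            rw [List.head?_eq_head hne2] at h5
            exact Option.some.inj h5
          have hmmark : PySem.Chars.isIn ['@', '@'] m.toList = true := by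
            rw [h4] at h3
            simpa [hnm] using h3
          have hmk2 : pvMk d = 0 :: (pvMk d').map (· + 1) := by
            rw [hdc]; exact pvMk_dropWhile_head m d' hmmark
          have hlenxs : xs.length = t.length + d.length := by
            have := congrArg List.length hxs; simpa using this
          have hlist : ((pvMk d).map (fun i => (t.length + 1) + i)) ++ [(x :: xs).length] =
              (t.length + 1) ::
                ((((pvMk d').map (· + 1)) ++ [d.length]).map (fun i => (t.length + 1) + i)) := by
            rw [hmk2]
            simp only [List.map_cons, List.map_append, List.map_map, List.cons_append,
              List.map_nil, List.length_cons, Nat.add_zero]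
            congr 1 <;>
              first
                | (apply List.map_congr_left; intro i _; simp [Function.comp])
                | (congr 1 <;>
                    first
                      | (apply List.map_congr_left; intro i _; simp [Function.comp])
                      | (congr 1 <;> omega)
                      | omega)
                | omega
          rw [hlist, pvSegs]
          have hfirst : PySem.List.slice (x :: xs) (some ((0 : Nat) : Int))
              (some ((t.length + 1 : Nat) : Int)) = x :: t := by
            rw [PySem.List.slice_natCast, hxs]
            simp [List.take_append_of_le_length, List.take_of_length_le]
          have hxxs : x :: xs = (x :: t) ++ d := by rw [hxs]; simp
          have hshift : pvSegs (x :: xs) (t.length + 1)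
              ((((pvMk d').map (· + 1)) ++ [d.length]).map (fun i => (t.length + 1) + i)) =
              pvSegs d 0 (((pvMk d').map (· + 1)) ++ [d.length]) := by
            have hsh := pvSegs_shift (x :: t) d ((((pvMk d').map (· + 1)) ++ [d.length])) 0
            simp only [List.length_cons, Nat.add_zero] at hsh
            rw [hxxs]
            exact hsh
          have hmkpos : ((pvMk d).filter (fun i => decide (0 < i))) =
              (pvMk d').map (· + 1) := by
            rw [hmk2]
            simp only [List.filter_cons]
            have hpos : ((pvMk d').map (· + 1)).filter (fun i => decide (0 < i)) =
                (pvMk d').map (· + 1) := by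
              apply List.filter_eq_self.mpr
              intro a ha
              obtain ⟨b, _, rfl⟩ := List.mem_map.mp ha
              simp
            simp [hpos]
          have hdlen : d.length ≤ n := by
            have h1 : d.length ≤ xs.length := hd ▸ xs.length_dropWhile_le nm
            simp only [List.length_cons] at hlen
            omega
          rw [hshift, ← hmkpos, ← ih d hdlen hdnil, hfirst]

-- B unfolds to pvSegs over the same bounds.
theorem pvB_eq_segs (diff : List String) (hne : diff ≠ []) :
    separate_diff_into_subsections_alt diff =
      pvSegs diff 0 (((pvMk diff).filter (fun i => decide (0 < i))) ++ [diff.length]) := by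
  have hmk := pvMarkers_eq_mk diff 0
  simp only [zero_add] at hmk
  have hfilter : ((pvMk diff).map (fun i : Nat => (i : Int))).filter
      (fun i => decide (0 < i)) =
      ((pvMk diff).filter (fun i => decide (0 < i))).map (fun i : Nat => (i : Int)) := by
    rw [List.filter_map]
    exact congrArg _ (List.filter_congr (fun a _ => by simp))
  have hz := pvZip_eq_segs diff
    (((pvMk diff).filter (fun i => decide (0 < i))) ++ [diff.length]) 0
  rw [separate_diff_into_subsections_alt, if_neg hne]
  dsimp only
  rw [hmk, hfilter, ← hz]
  apply congrArg
  congr 1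
  · simp
  · simp

-- ===== VERDICT (by name: the statement is the Claim_ definition above) =====
theorem separate_diff_into_subsections_spec : Claim_equal_separate_diff_into_subsections := by
  intro diff _
  unfold Spec_separate_diff_into_subsections
  cases hd : diff with
  | nil => simp [separate_diff_into_subsections, separate_diff_into_subsections_alt]
  | cons x xs =>
      rw [← hd, pvA_eq_chunks, pvB_eq_segs diff (by rw [hd]; simp)]
      exact pvChunks_eq_segs diff.length diff le_rfl (by rw [hd]; simp)
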